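-- pv_equiv track=rewrite | github.com/zxzhangragnar/CycleFlux | inst/python/get_pathway_subnet_dedup.py | dedup_and_get_diff_index
-- ===== SOURCE A (Python) =====
-- def dedup_and_get_diff_index(arr):
--     # 记录2者不同的元素的序号
--     set_collection = list()
--     index_collection = list()
--     for i in range(len(arr)):
--         if arr[i] not in set_collection:
--             set_collection.append(arr[i])
--             index_collection.append(i)
--
--     return set_collection, index_collection
-- ===== SOURCE B (Python) =====
-- def dedup_and_get_diff_index(arr):
--     # Dedup-then-search: first collect first-occurrence values, then recover
--     # each value's index with arr.index (first occurrence) in a second pass.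
--     vals = []
--     for x in arr:
--         if x not in vals:
--             vals.append(x)
--     idx = [arr.index(v) for v in vals]
--     return vals, idx
-- ===== Notes on version B (the rewrite author's own statement) =====
-- stated objective: alternative
-- what changed: Splits A's single index loop that accumulates values and indices together into two passes: a dedup loop over the elements producing the values, then an arr.index comprehension recovering each value's first-occurrence index.
import Mathlib
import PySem

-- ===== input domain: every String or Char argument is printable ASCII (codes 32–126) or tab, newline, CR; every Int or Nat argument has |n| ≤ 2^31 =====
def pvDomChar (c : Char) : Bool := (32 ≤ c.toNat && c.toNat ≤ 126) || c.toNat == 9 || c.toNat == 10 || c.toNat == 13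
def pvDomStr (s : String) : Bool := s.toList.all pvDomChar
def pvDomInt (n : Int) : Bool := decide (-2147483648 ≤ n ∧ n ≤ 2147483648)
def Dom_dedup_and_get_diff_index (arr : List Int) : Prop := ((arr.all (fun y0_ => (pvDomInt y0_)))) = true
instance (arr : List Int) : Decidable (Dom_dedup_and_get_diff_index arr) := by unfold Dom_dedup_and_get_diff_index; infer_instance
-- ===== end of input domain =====

-- B replaces A's single index loop (values and indices accumulated together) by a
-- dedup pass over the elements followed by an arr.index pass recovering the indices
-- (objective: alternative decomposition, same cost).


-- ===== PORT A =====
-- for i in range(len(arr)): if arr[i] not in set_collection: append arr[i]; append i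
def dedup_and_get_diff_index (arr : List Int) : List Int × List Int :=
  (PySem.List.pyRange 0 (arr.length : Int) 1).foldl
    (fun st i =>
      if PySem.List.pyGetD arr i 0 ∈ st.1 then st
      else (st.1 ++ [PySem.List.pyGetD arr i 0], st.2 ++ [i]))
    ([], [])

-- ===== PORT B =====
-- vals = dedup loop over the elements; idx = [arr.index(v) for v in vals]
def dedup_and_get_diff_index_alt (arr : List Int) : List Int × List Int :=
  let vals := arr.foldl (fun vs x => if x ∈ vs then vs else vs ++ [x]) []
  (vals, vals.map (fun v => ((PySem.List.index? arr v).getD 0 : Int)))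

-- ===== PRECONDITION & SPEC =====
def Spec_dedup_and_get_diff_index (arr : List Int) (out : List Int × List Int) : Prop := out = dedup_and_get_diff_index_alt arr
instance (arr : List Int) (out : List Int × List Int) : Decidable (Spec_dedup_and_get_diff_index arr out) := by unfold Spec_dedup_and_get_diff_index; infer_instance

-- ===== CLAIM (what is proved, stated in full; the proofs are below) =====
def Claim_equal_dedup_and_get_diff_index : Prop := ∀ (arr : List Int), Dom_dedup_and_get_diff_index arr → Spec_dedup_and_get_diff_index arr (dedup_and_get_diff_index arr)

-- ===== LEMMAS AND PROOFS =====

-- membership in B's dedup accumulator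
lemma mem_dedup_foldl (l : List Int) : ∀ (vs y : _),
    y ∈ l.foldl (fun vs x => if x ∈ vs then vs else vs ++ [x]) vs ↔ y ∈ vs ∨ y ∈ l := by
  induction l with
  | nil => simp
  | cons a l ih =>
      intro vs y
      simp only [List.foldl_cons]
      by_cases ha : a ∈ vs
      · simp only [if_pos ha, ih, List.mem_cons]
        constructor
        · rintro (h | h)
          · exact Or.inl h
          · exact Or.inr (Or.inr h)
        · rintro (h | h | h)
          · exact Or.inl h
          · exact Or.inl (h ▸ ha)
          · exact Or.inr h
      · simp [ha, ih, List.mem_append]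
        tauto

lemma ports_agree (arr : List Int) :
    dedup_and_get_diff_index arr = dedup_and_get_diff_index_alt arr := by
  induction arr using List.reverseRecOn with
  | nil => rfl
  | append_singleton arr x ih =>
      have hlen : ((arr ++ [x]).length : Int) = (arr.length : Int) + 1 := by
        simp
      have hvals :
          (arr ++ [x]).foldl (fun vs y => if y ∈ vs then vs else vs ++ [y]) [] =
            (if x ∈ arr.foldl (fun vs y => if y ∈ vs then vs else vs ++ [y]) [] then
              arr.foldl (fun vs y => if y ∈ vs then vs else vs ++ [y]) []
            else arr.foldl (fun vs y => if y ∈ vs then vs else vs ++ [y]) [] ++ [x]) := by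
        rw [List.foldl_append]; rfl
      set vals := arr.foldl (fun vs y => if y ∈ vs then vs else vs ++ [y]) [] with hv
      have hmem : ∀ y, y ∈ vals ↔ y ∈ arr := by
        intro y; rw [hv, mem_dedup_foldl]; simp
      -- A's fold over the prefix sees the same elements
      have hprefix :
          (PySem.List.pyRange 0 (arr.length : Int) 1).foldl
            (fun (st : List Int × List Int) i =>
              if PySem.List.pyGetD (arr ++ [x]) i 0 ∈ st.1 then st
              else (st.1 ++ [PySem.List.pyGetD (arr ++ [x]) i 0], st.2 ++ [i])) ([], []) =
          dedup_and_get_diff_index arr := by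
        unfold dedup_and_get_diff_index
        apply PySem.List.foldl_congr_mem
        intro st i hi
        have hib := (PySem.List.mem_pyRange_one).1 hi
        have h0 : 0 ≤ i := hib.1
        have h1 : i < (arr.length : Int) := hib.2
        have h1' : i.toNat < arr.length := by omega
        have h2 : i.toNat < (arr ++ [x]).length := by simp; omega
        rw [PySem.List.pyGetD_eq_getElem _ 0 h0 (by simpa using h2),
            PySem.List.pyGetD_eq_getElem _ 0 h0 (by exact_mod_cast h1),
            List.getElem_append_left h1']
      -- index maps agree on values of arr
      have hidx : ∀ v, v ∈ arr →
          ((PySem.List.index? (arr ++ [x]) v).getD 0 : Int) =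
          ((PySem.List.index? arr v).getD 0 : Int) := by
        intro v hv'
        rw [PySem.List.index?_append_of_mem _ hv']
      unfold dedup_and_get_diff_index dedup_and_get_diff_index_alt
      simp only []
      rw [hlen, PySem.List.pyRange_one_succ_right (by positivity), List.foldl_append,
          hprefix, ih]
      have hx : PySem.List.pyGetD (arr ++ [x]) (arr.length : Int) 0 = x := by
        rw [PySem.List.pyGetD_eq_getElem _ 0 (by positivity) (by simp)]
        simp
      unfold dedup_and_get_diff_index_alt
      simp only [List.foldl_cons, List.foldl_nil] at *
      rw [hvals, ← hv]
      by_cases hmx : x ∈ vals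
      · have hxa : x ∈ arr := (hmem x).1 hmx
        simp only [hx, hmx, if_pos]
        exact Prod.ext rfl (List.map_congr_left (fun v hvv => (hidx v ((hmem v).1 hvv)).symm))
      · have hxa : x ∉ arr := fun h => hmx ((hmem x).2 h)
        simp only [hx, hmx, if_false, List.map_append]
        refine Prod.ext rfl ?_
        simp only [List.map_cons, List.map_nil]
        rw [List.map_congr_left (fun v hvv => hidx v ((hmem v).1 hvv)),
            PySem.List.index?_append_singleton_self _ _ hxa]
        simp

-- ===== VERDICT (by name: the statement is the Claim_ definition above) =====
theorem dedup_and_get_diff_index_spec : Claim_equal_dedup_and_get_diff_index := by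
  intro arr _
  unfold Spec_dedup_and_get_diff_index
  exact ports_agree arr
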